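-- pv_equiv track=rewrite | github.com/Stillav/ProblemSolving | 프로그래머스/unrated/148653. 마법의 엘리베이터/마법의 엘리베이터.py | solution
-- ===== SOURCE A (Python) =====
-- def solution(storey):
--     answer = 0
--
--     while storey != 0:
--         temp = storey % 10
--         storey //= 10
--
--         if temp < 5:
--             answer += temp
--         elif temp == 5:
--             answer += (10 - temp)
--             if storey % 10 >= 5:
--                 storey += 1
--         else:
--             answer += (10 - temp)
--             storey += 1
--
--     return answer
-- ===== SOURCE B (Python) =====
-- def solution(storey):
--     # Recursive min-DP over decimal digits: at each digit choose to press down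
--     # (cost d) or press up with a carry (cost 10-d), taking the minimum.
--     if storey < 10:
--         return min(storey, 11 - storey)
--     d = storey % 10
--     rest = storey // 10
--     return min(d + solution(rest), (10 - d) + solution(rest + 1))
-- ===== Notes on version B (the rewrite author's own statement) =====
-- stated objective: simpler
-- what changed: Replaced A's iterative greedy LSB scan with its halfway-digit lookahead by a short recursive min-DP over decimal digits (press down vs press up with carry, take the minimum).
-- outside the precondition, e.g. on solution(-1): A returns 1, B returns -1; on solution(-23): A returns 5, B returns -23
import Mathlib
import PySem

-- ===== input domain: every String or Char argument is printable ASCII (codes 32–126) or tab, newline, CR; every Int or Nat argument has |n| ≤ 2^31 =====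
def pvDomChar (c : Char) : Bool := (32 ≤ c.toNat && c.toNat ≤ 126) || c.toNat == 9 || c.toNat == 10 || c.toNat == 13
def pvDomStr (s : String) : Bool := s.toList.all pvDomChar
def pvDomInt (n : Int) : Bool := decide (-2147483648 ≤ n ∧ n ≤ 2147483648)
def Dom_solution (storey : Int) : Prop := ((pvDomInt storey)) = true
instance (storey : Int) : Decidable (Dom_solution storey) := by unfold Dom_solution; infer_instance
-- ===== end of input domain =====

-- B replaces A's greedy least-significant-digit scan (with its halfway-digit lookahead) by a
-- short recursive min over both choices per digit: simpler, same exact values on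
-- the natural domain of nonnegative storeys.

-- ===== PORT A =====
def solutionLoop (fuel : Nat) (storey answer : Int) : Int :=
  match fuel with
  | 0 => answer
  | fuel + 1 =>
    if storey ≠ 0 then
      let temp := PySem.Int.mod storey 10
      let storey' := PySem.Int.floordiv storey 10
      if temp < 5 then
        solutionLoop fuel storey' (answer + temp)
      else if temp = 5 then
        solutionLoop fuel (if 5 ≤ PySem.Int.mod storey' 10 then storey' + 1 else storey')
          (answer + (10 - temp))
      else
        solutionLoop fuel (storey' + 1) (answer + (10 - temp))
    else answer

def solution (storey : Int) : Int := solutionLoop (storey.natAbs + 1) storey 0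

-- ===== PORT B =====
def solution_alt (storey : Int) : Int :=
  if h : storey < 10 then
    min storey (11 - storey)
  else
    let d := PySem.Int.mod storey 10
    let rest := PySem.Int.floordiv storey 10
    min (d + solution_alt rest) ((10 - d) + solution_alt (rest + 1))
termination_by storey.toNat
decreasing_by
  · simp only [PySem.Int.floordiv_eq_ediv_of_pos (a := storey) (by norm_num : (0:Int) < 10)]
    omega
  · simp only [PySem.Int.floordiv_eq_ediv_of_pos (a := storey) (by norm_num : (0:Int) < 10)]
    omega

-- ===== PRECONDITION & SPEC =====
-- Pre_ restricts to the task's natural domain of nonnegative storey numbers; on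
-- negative inputs (never valid storeys) A's loop still returns a press count while
-- B's recursion naturally bottoms out at the negative value itself.
def Pre_solution (storey : Int) : Prop := 0 ≤ storey
instance (storey : Int) : Decidable (Pre_solution storey) := by unfold Pre_solution; infer_instance
def pvWitness_solution : Int := 2554
def Spec_solution (storey : Int) (out : Int) : Prop := out = solution_alt storey
instance (storey : Int) (out : Int) : Decidable (Spec_solution storey out) := by unfold Spec_solution; infer_instance

-- ===== CLAIM (what is proved, stated in full; the proofs are below) =====
def Claim_equal_solution : Prop := ∀ (storey : Int), Dom_solution storey → Pre_solution storey → Spec_solution storey (solution storey)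

-- ===== LEMMAS AND PROOFS =====

theorem mod10 (a : Int) : PySem.Int.mod a 10 = a % 10 :=
  PySem.Int.mod_eq_emod_of_pos (by norm_num)

theorem fdiv10 (a : Int) : PySem.Int.floordiv a 10 = a / 10 :=
  PySem.Int.floordiv_eq_ediv_of_pos (by norm_num)

theorem alt_base (n : Int) (h : n < 10) : solution_alt n = min n (11 - n) := by
  rw [solution_alt, dif_pos h]

theorem alt_rec (n : Int) (h : ¬ n < 10) :
    solution_alt n = min (n % 10 + solution_alt (n / 10))
      ((10 - n % 10) + solution_alt (n / 10 + 1)) := by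
  rw [solution_alt, dif_neg h, mod10, fdiv10]

theorem alt0 : solution_alt 0 = 0 := by rw [alt_base] <;> norm_num
theorem alt1 : solution_alt 1 = 1 := by rw [alt_base] <;> norm_num
theorem alt2 : solution_alt 2 = 2 := by rw [alt_base] <;> norm_num
theorem alt9 : solution_alt 9 = 2 := by rw [alt_base] <;> norm_num
theorem alt10 : solution_alt 10 = 1 := by
  rw [alt_rec 10 (by norm_num)]
  norm_num [alt1, alt2]

-- Lipschitz property of B: adjacent storeys differ by at most one press.
theorem lip : ∀ (k : Nat) (n : Int), 0 ≤ n → n < k →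
    solution_alt (n + 1) ≤ solution_alt n + 1 ∧ solution_alt n ≤ solution_alt (n + 1) + 1 := by
  intro k
  induction k with
  | zero => intro n h0 hk; omega
  | succ k ih =>
    intro n h0 hk
    by_cases h9 : n ≤ 8
    · rw [alt_base n (by omega), alt_base (n + 1) (by omega)]
      omega
    by_cases hn9 : n = 9
    · subst hn9; rw [alt9, show (9:Int) + 1 = 10 by norm_num, alt10]; omega
    -- n ≥ 10
    have h10 : ¬ n < 10 := by omega
    have hd : 0 ≤ n % 10 ∧ n % 10 ≤ 9 := by omega
    by_cases hd8 : n % 10 ≤ 8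
    · have e1 : (n + 1) % 10 = n % 10 + 1 := by omega
      have e2 : (n + 1) / 10 = n / 10 := by omega
      rw [alt_rec n h10, alt_rec (n + 1) (by omega), e1, e2]
      omega
    · -- last digit 9
      have hd9 : n % 10 = 9 := by omega
      have e1 : (n + 1) % 10 = 0 := by omega
      have e2 : (n + 1) / 10 = n / 10 + 1 := by omega
      have hih := ih (n / 10 + 1) (by omega) (by omega)
      have hih2 := ih (n / 10) (by omega) (by omega)
      rw [alt_rec n h10, alt_rec (n + 1) (by omega), e1, e2, hd9]
      have : n / 10 + 1 + 1 = n / 10 + 2 := by ring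
      omega

theorem lip' (n : Int) (h : 0 ≤ n) :
    solution_alt (n + 1) ≤ solution_alt n + 1 ∧ solution_alt n ≤ solution_alt (n + 1) + 1 :=
  lip (n.toNat + 1) n h (by omega)

-- Direction of change: B is nondecreasing across n→n+1 when the last digit is < 5,
-- nonincreasing when it is ≥ 5.
theorem dir (n : Int) (h0 : 0 ≤ n) :
    (n % 10 < 5 → solution_alt n ≤ solution_alt (n + 1)) ∧
    (5 ≤ n % 10 → solution_alt (n + 1) ≤ solution_alt n) := by
  by_cases h9 : n ≤ 8
  · rw [alt_base n (by omega), alt_base (n + 1) (by omega)]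
    omega
  by_cases hn9 : n = 9
  · subst hn9; rw [alt9, show (9:Int) + 1 = 10 by norm_num, alt10]; omega
  have h10 : ¬ n < 10 := by omega
  have hlr := lip' (n / 10) (by omega)
  by_cases hd8 : n % 10 ≤ 8
  · have e1 : (n + 1) % 10 = n % 10 + 1 := by omega
    have e2 : (n + 1) / 10 = n / 10 := by omega
    rw [alt_rec n h10, alt_rec (n + 1) (by omega), e1, e2]
    omega
  · have hd9 : n % 10 = 9 := by omega
    have e1 : (n + 1) % 10 = 0 := by omega
    have e2 : (n + 1) / 10 = n / 10 + 1 := by omega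
    rw [alt_rec n h10, alt_rec (n + 1) (by omega), e1, e2, hd9]
    have : n / 10 + 1 + 1 = n / 10 + 2 := by ring
    omega

-- The three one-step characterisations of B matching A's branches.
theorem stepLow (n : Int) (h1 : 1 ≤ n) (hd : n % 10 < 5) :
    solution_alt n = n % 10 + solution_alt (n / 10) := by
  by_cases h10 : n < 10
  · have : n % 10 = n := by omega
    have : n / 10 = 0 := by omega
    rw [alt_base n h10, ‹n / 10 = 0›, ‹n % 10 = n›, alt0]
    omega
  · have hlr := lip' (n / 10) (by omega)
    rw [alt_rec n h10]
    omega

theorem stepHigh (n : Int) (h1 : 1 ≤ n) (hd : 6 ≤ n % 10) :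
    solution_alt n = (10 - n % 10) + solution_alt (n / 10 + 1) := by
  by_cases h10 : n < 10
  · have : n % 10 = n := by omega
    have : n / 10 = 0 := by omega
    rw [alt_base n h10, ‹n / 10 = 0›, ‹n % 10 = n›, show (0:Int) + 1 = 1 by norm_num, alt1]
    omega
  · have hlr := lip' (n / 10) (by omega)
    rw [alt_rec n h10]
    omega

theorem stepFive (n : Int) (h1 : 1 ≤ n) (hd : n % 10 = 5) :
    solution_alt n =
      5 + (if 5 ≤ (n / 10) % 10 then solution_alt (n / 10 + 1) else solution_alt (n / 10)) := by
  by_cases h10 : n < 10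
  · have hn : n = 5 := by omega
    subst hn
    norm_num [alt_base 5 (by norm_num), alt0]
  · have hdir := dir (n / 10) (by omega)
    rw [alt_rec n h10, hd]
    split_ifs with hc
    · have := hdir.2 hc
      omega
    · have := hdir.1 (by omega)
      omega

-- A's loop computes answer + B(n) whenever fuel exceeds n.
theorem loop_eq : ∀ (fuel : Nat) (n answer : Int), 0 ≤ n → n < fuel →
    solutionLoop fuel n answer = answer + solution_alt n := by
  intro fuel
  induction fuel with
  | zero => intro n answer h0 hk; omega
  | succ fuel ih =>
    intro n answer h0 hk
    by_cases hz : n = 0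
    · subst hz
      simp [solutionLoop, alt0]
    · rw [solutionLoop]
      simp only [if_pos hz, mod10, fdiv10]
      by_cases hlt : n % 10 < 5
      · rw [if_pos hlt, ih (n / 10) _ (by omega) (by omega), stepLow n (by omega) hlt]
        ring
      · rw [if_neg hlt]
        by_cases h5 : n % 10 = 5
        · rw [if_pos h5, h5]
          split_ifs with hc
          · rw [ih (n / 10 + 1) _ (by omega) (by omega), stepFive n (by omega) h5, if_pos hc]
            ring
          · rw [ih (n / 10) _ (by omega) (by omega), stepFive n (by omega) h5, if_neg hc]
            ring
        · rw [if_neg h5, ih (n / 10 + 1) _ (by omega) (by omega),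
            stepHigh n (by omega) (by omega)]
          ring

-- ===== VERDICT (by name: the statement is the Claim_ definition above) =====
theorem solution_spec : Claim_equal_solution := by
  intro storey _ hpre
  unfold Spec_solution solution
  rw [loop_eq (storey.natAbs + 1) storey 0 hpre (by omega)]
  ring
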